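-- pv_equiv track=rewrite | github.com/path-96/DataInterpretor | ui.py | _validate_ip_partial
-- ===== SOURCE A (Python) =====
-- def _validate_ip_partial(value: str) -> bool:
--     """Validate IPv4 input while typing.
--
--     Rules:
--     - Only digits and up to three dots.
--     - At most 4 octets.
--     - Each octet 0-255 and max length 3 (when present).
--     - Empty is allowed during typing.
--     """
--     if value == "":
--         return True
--     if len(value) > 15:  # 255.255.255.255
--         return False
--     if any(c not in "0123456789." for c in value):
--         return False
--     parts = value.split(".")
--     if len(parts) > 4:
--         return False
--     for part in parts:
--         if part == "":
--             continue  # allow incomplete octets like '192.'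
--         if len(part) > 3:
--             return False
--         # Leading zeros are allowed; check numeric range
--         try:
--             num = int(part)
--         except ValueError:
--             return False
--         if num < 0 or num > 255:
--             return False
--     return True
-- ===== SOURCE B (Python) =====
-- def _validate_ip_partial(value: str) -> bool:
--     """Single-pass scanner: track dot count and the current octet's digit
--     length and value while walking the string once, instead of split-then-loop."""
--     if value == "":
--         return True
--     if len(value) > 15:  # 255.255.255.255
--         return False
--     dots = 0
--     olen = 0
--     oval = 0
--     for c in value:
--         if c == '.':
--             dots += 1
--             if dots > 3:
--                 return False
--             olen = 0
--             oval = 0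
--         elif '0' <= c <= '9':
--             olen += 1
--             if olen > 3:
--                 return False
--             oval = oval * 10 + (ord(c) - 48)
--             if oval > 255:
--                 return False
--         else:
--             return False
--     return True
-- ===== Notes on version B (the rewrite author's own statement) =====
-- stated objective: alternative
-- what changed: Replaces split('.')-then-validate-each-part with a single character-by-character scanner that maintains a dot counter and the current octet's digit length and numeric value, never materializing a parts list.
import Mathlib
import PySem

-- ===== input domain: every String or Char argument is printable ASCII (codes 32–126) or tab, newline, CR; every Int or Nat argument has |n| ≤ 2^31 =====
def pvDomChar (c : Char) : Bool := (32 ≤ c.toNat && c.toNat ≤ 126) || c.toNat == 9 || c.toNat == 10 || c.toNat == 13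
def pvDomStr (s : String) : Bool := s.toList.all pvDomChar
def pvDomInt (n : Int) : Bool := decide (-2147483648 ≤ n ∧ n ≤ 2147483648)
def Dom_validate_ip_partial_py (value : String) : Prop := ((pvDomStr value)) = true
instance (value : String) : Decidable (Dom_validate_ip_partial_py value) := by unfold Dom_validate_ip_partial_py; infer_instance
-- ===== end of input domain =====

-- B replaces A's split('.')-then-validate-each-part with a single-pass scanner
-- keeping a dot counter and the current octet's digit length and value (alternative decomposition, same cost).

-- ===== PORT A =====
-- the per-part loop of A ('for part in parts: ...')
def validate_ip_partial_py_loop : List (List Char) → Bool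
  | [] => true
  | part :: rest =>
    if part = [] then validate_ip_partial_py_loop rest         -- allow incomplete octets like '192.'
    else if PySem.Chars.len part > 3 then false
    else
      match PySem.Int.ofChars? part with                        -- int(part), ValueError → none
      | none => false
      | some num => if num < 0 || num > 255 then false else validate_ip_partial_py_loop rest

def validate_ip_partial_py (value : String) : Bool :=
  if value = "" then true
  else if PySem.Str.len value > 15 then false
  else if value.toList.any (fun c => !("0123456789.".toList.contains c)) then false
  else
    let parts := PySem.Chars.splitOn value.toList ['.']         -- value.split(".")
    if parts.length > 4 then false
    else validate_ip_partial_py_loop parts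

-- ===== PORT B =====
-- the scanner loop of B: state = (dots seen, current octet's digit count, current octet's value)
def validate_ip_partial_py_scan : List Char → Nat → Nat → Nat → Bool
  | [], _, _, _ => true
  | c :: cs, dots, olen, oval =>
    if c = '.' then
      if dots + 1 > 3 then false
      else validate_ip_partial_py_scan cs (dots + 1) 0 0
    else if '0' ≤ c ∧ c ≤ '9' then
      if olen + 1 > 3 then false
      else if oval * 10 + (c.toNat - 48) > 255 then false
      else validate_ip_partial_py_scan cs dots (olen + 1) (oval * 10 + (c.toNat - 48))
    else false

def validate_ip_partial_py_alt (value : String) : Bool :=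
  if value = "" then true
  else if PySem.Str.len value > 15 then false
  else validate_ip_partial_py_scan value.toList 0 0 0

-- ===== PRECONDITION & SPEC =====
def Spec_validate_ip_partial_py (value : String) (out : Bool) : Prop := out = validate_ip_partial_py_alt value
instance (value : String) (out : Bool) : Decidable (Spec_validate_ip_partial_py value out) := by unfold Spec_validate_ip_partial_py; infer_instance

-- ===== CLAIM (what is proved, stated in full; the proofs are below) =====
def Claim_equal_validate_ip_partial_py : Prop := ∀ (value : String), Dom_validate_ip_partial_py value → Spec_validate_ip_partial_py value (validate_ip_partial_py value)

-- ===== LEMMAS AND PROOFS =====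

-- the ten decimal digit characters
def pvD : List Char := ['0','1','2','3','4','5','6','7','8','9']

-- decimal value of a digit string (leading zeros allowed)
def pvVal (p : List Char) : Nat := p.foldl (fun a c => a * 10 + (c.toNat - 48)) 0

-- split on '.' as a structural recursion (reference model for PySem.Chars.splitOn · ['.'])
def pvSplit : List Char → List (List Char)
  | [] => [[]]
  | c :: cs =>
    if c = '.' then [] :: pvSplit cs
    else
      match pvSplit cs with
      | [] => [[c]]
      | h :: t => (c :: h) :: t

-- prepend pending digits to the first split segment
def pvConsHead (p : List Char) : List (List Char) → List (List Char)
  | [] => [p]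
  | h :: t => (p ++ h) :: t

theorem pvVal_append (p : List Char) (c : Char) :
    pvVal (p ++ [c]) = pvVal p * 10 + (c.toNat - 48) := by
  simp [pvVal]

theorem pvVal_foldl_ge (q : List Char) : ∀ a : Nat, a ≤ q.foldl (fun a c => a * 10 + (c.toNat - 48)) a := by
  induction q with
  | nil => intro a; simp
  | cons c q ih =>
    intro a
    calc a ≤ a * 10 + (c.toNat - 48) := by omega
    _ ≤ _ := by simpa using ih (a * 10 + (c.toNat - 48))

theorem pvVal_le_append (p q : List Char) : pvVal p ≤ pvVal (p ++ q) := by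
  simpa [pvVal, List.foldl_append] using pvVal_foldl_ge q (pvVal p)

theorem pvE1 : (pvD.all fun a => PySem.Int.ofChars? [a] == some ((pvVal [a] : Nat) : Int)) = true := by decide

theorem pvE2 : (pvD.all fun a => pvD.all fun b =>
    PySem.Int.ofChars? [a, b] == some ((pvVal [a, b] : Nat) : Int)) = true := by decide

set_option maxHeartbeats 1000000 in
theorem pvE3 : (pvD.all fun a => pvD.all fun b => pvD.all fun c =>
    PySem.Int.ofChars? [a, b, c] == some ((pvVal [a, b, c] : Nat) : Int)) = true := by decide

theorem pvOfChars_digits (p : List Char) (hne : p ≠ []) (hlen : p.length ≤ 3)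
    (hd : ∀ c ∈ p, c ∈ pvD) : PySem.Int.ofChars? p = some ((pvVal p : Nat) : Int) := by
  match p, hne with
  | [a], _ =>
    have h1 := List.all_eq_true.mp pvE1 a (hd a (by simp))
    exact eq_of_beq h1
  | [a, b], _ =>
    have h1 := List.all_eq_true.mp pvE2 a (hd a (by simp))
    have h2 := List.all_eq_true.mp h1 b (hd b (by simp))
    exact eq_of_beq h2
  | [a, b, c], _ =>
    have h1 := List.all_eq_true.mp pvE3 a (hd a (by simp))
    have h2 := List.all_eq_true.mp h1 b (hd b (by simp))
    have h3 := List.all_eq_true.mp h2 c (hd c (by simp))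
    exact eq_of_beq h3
  | a :: b :: c :: d :: r, _ => simp at hlen; omega

theorem pvDigit_mem (c : Char) (h1 : '0' ≤ c) (h2 : c ≤ '9') : c ∈ pvD := by
  have ha : 48 ≤ c.toNat ∧ c.toNat ≤ 57 := by
    constructor <;> simpa [Char.le_def, UInt32.le_iff_toNat_le] using ‹_›
  have hc := Char.ofNat_toNat c
  have : c.toNat = 48 ∨ c.toNat = 49 ∨ c.toNat = 50 ∨ c.toNat = 51 ∨ c.toNat = 52 ∨
      c.toNat = 53 ∨ c.toNat = 54 ∨ c.toNat = 55 ∨ c.toNat = 56 ∨ c.toNat = 57 := by omega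
  rcases this with h | h | h | h | h | h | h | h | h | h <;> rw [h] at hc <;> rw [← hc] <;> decide

theorem pvCharsEq : "0123456789.".toList = ['0','1','2','3','4','5','6','7','8','9','.'] := by simp

theorem pvCharOK_cases (c : Char) (h : ("0123456789.".toList.contains c) = true) :
    c = '.' ∨ ('0' ≤ c ∧ c ≤ '9') := by
  have hm : c ∈ ['0','1','2','3','4','5','6','7','8','9','.'] := by
    rw [← pvCharsEq]; simpa using h
  fin_cases hm <;> first | (left; rfl) | (right; constructor <;> decide)

theorem pvMem_charOK (c : Char) (h : c ∈ pvD) : ("0123456789.".toList.contains c) = true := by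
  rw [pvCharsEq]
  fin_cases h <;> decide

theorem pvSplit_cons_exists (cs : List Char) : ∃ h t, pvSplit cs = h :: t := by
  cases cs with
  | nil => exact ⟨[], [], rfl⟩
  | cons c cs =>
    by_cases hc : c = '.'
    · exact ⟨[], pvSplit cs, by simp [pvSplit, hc]⟩
    · rcases hrec : pvSplit cs with _ | ⟨h, t⟩
      · exact ⟨[c], [], by simp [pvSplit, hc, hrec]⟩
      · exact ⟨c :: h, t, by simp [pvSplit, hc, hrec]⟩

theorem pvGo_cons (fuel : Nat) (c : Char) (rest cur : List Char) (acc : List (List Char)) :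
    PySem.Chars.splitOn.go ['.'] (fuel + 1) (c :: rest) cur acc =
      if c = '.' then PySem.Chars.splitOn.go ['.'] fuel rest [] (cur.reverse :: acc)
      else PySem.Chars.splitOn.go ['.'] fuel rest (c :: cur) acc := by
  by_cases h : c = '.'
  · subst h; simp [PySem.Chars.splitOn.go, List.isPrefixOf]
  · simp only [PySem.Chars.splitOn.go, List.isPrefixOf, if_neg h]
    split
    · rename_i hp
      simp only [Bool.and_eq_true, beq_iff_eq] at hp
      exact absurd hp.1.symm h
    · rfl

theorem pvGo_spec (fuel : Nat) : ∀ (l cur : List Char) (acc : List (List Char)), l.length < fuel →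
    PySem.Chars.splitOn.go ['.'] fuel l cur acc = acc.reverse ++ pvConsHead cur.reverse (pvSplit l) := by
  induction fuel with
  | zero => intro l cur acc h; omega
  | succ fuel ih =>
    intro l cur acc h
    cases l with
    | nil => simp [PySem.Chars.splitOn.go, pvSplit, pvConsHead]
    | cons c rest =>
      rw [pvGo_cons]
      obtain ⟨h0, t0, heq⟩ := pvSplit_cons_exists rest
      by_cases hc : c = '.'
      · rw [if_pos hc, ih rest [] (cur.reverse :: acc) (by simp at h; omega)]
        simp [pvSplit, hc, heq, pvConsHead]
      · rw [if_neg hc, ih rest (c :: cur) acc (by simp at h; omega)]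
        simp [pvSplit, hc, heq, pvConsHead]

theorem pvSplitOn_eq (cs : List Char) : PySem.Chars.splitOn cs ['.'] = pvSplit cs := by
  obtain ⟨h0, t0, heq⟩ := pvSplit_cons_exists cs
  rw [PySem.Chars.splitOn, pvGo_spec (cs.length + 1) cs [] [] (by omega)]
  simp [heq, pvConsHead]

-- A's loop on a digit-only head part equals the closed condition 'len ≤ 3 ∧ value ≤ 255'
theorem pvLoop_cons (p : List Char) (t : List (List Char)) (hd : ∀ c ∈ p, c ∈ pvD) :
    validate_ip_partial_py_loop (p :: t) =
      ((decide (p.length ≤ 3) && decide (pvVal p ≤ 255)) && validate_ip_partial_py_loop t) := by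
  by_cases hne : p = []
  · subst hne; simp [validate_ip_partial_py_loop, pvVal]
  · by_cases hlen : p.length ≤ 3
    · rw [validate_ip_partial_py_loop, if_neg hne,
        if_neg (by simp [PySem.Chars.len]; omega), pvOfChars_digits p hne hlen hd]
      by_cases hval : pvVal p ≤ 255
      · simp [hlen, hval]
      · simp only [hlen, decide_true, Bool.true_and]
        rw [if_pos (by simp; omega)]
        simp [hval]
    · rw [validate_ip_partial_py_loop, if_neg hne, if_pos (by simp [PySem.Chars.len]; omega)]
      simp [hlen]

theorem pvLoop_long (p : List Char) (t : List (List Char)) (hne : p ≠ []) (hlen : 3 < p.length) :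
    validate_ip_partial_py_loop (p :: t) = false := by
  rw [validate_ip_partial_py_loop, if_neg hne, if_pos (by simp [PySem.Chars.len]; omega)]

-- chars of the first split segment are digits, given all chars of cs are digits or dots
theorem pvHead_digits (cs : List Char) : ∀ (h : List Char) (t : List (List Char)),
    (cs.all fun c => "0123456789.".toList.contains c) = true →
    pvSplit cs = h :: t → ∀ x ∈ h, x ∈ pvD := by
  induction cs with
  | nil => intro h t _ heq x hx; simp [pvSplit] at heq; simp [heq.1] at hx
  | cons c cs ih =>
    intro h t hall heq x hx
    simp only [List.all_cons, Bool.and_eq_true] at hall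
    by_cases hc : c = '.'
    · simp [pvSplit, hc] at heq
      simp [heq.1] at hx
    · obtain ⟨h0, t0, hrec⟩ := pvSplit_cons_exists cs
      simp [pvSplit, hc, hrec] at heq
      rw [← heq.1] at hx
      rcases List.mem_cons.mp hx with rfl | hx0
      · rcases pvCharOK_cases x hall.1 with h' | h'
        · exact absurd h' hc
        · exact pvDigit_mem x h'.1 h'.2
      · exact ih h0 t0 hall.2 hrec x hx0

-- main invariant: the scanner with state (d, |p|, val p) computes the conjunction of
-- A's remaining checks, with pending digits p prepended to the first remaining segment
theorem pvScan_spec (cs : List Char) : ∀ (d : Nat) (p : List Char), d ≤ 3 → p.length ≤ 3 →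
    pvVal p ≤ 255 → (∀ c ∈ p, c ∈ pvD) →
    validate_ip_partial_py_scan cs d p.length (pvVal p) =
      ((cs.all fun c => "0123456789.".toList.contains c)
        && decide (d + (pvSplit cs).length ≤ 4)
        && validate_ip_partial_py_loop (pvConsHead p (pvSplit cs))) := by
  induction cs with
  | nil =>
    intro d p hd3 hlen hval hdig
    simp [validate_ip_partial_py_scan, pvSplit, pvConsHead,
      pvLoop_cons p [] hdig, validate_ip_partial_py_loop, hlen, hval]
    omega
  | cons c cs ih =>
    intro d p hd3 hlen hval hdig
    obtain ⟨h0, t0, hrec⟩ := pvSplit_cons_exists cs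
    by_cases hc : c = '.'
    · subst hc
      have hsplit : pvSplit ('.' :: cs) = [] :: pvSplit cs := by simp [pvSplit]
      by_cases hd : d + 1 > 3
      · rw [validate_ip_partial_py_scan, if_pos rfl, if_pos hd]
        have : ¬ (d + (pvSplit ('.' :: cs)).length ≤ 4) := by
          simp [hsplit, hrec]; omega
        simp [this]
      · rw [validate_ip_partial_py_scan, if_pos rfl, if_neg hd]
        have := ih (d + 1) [] (by omega) (by simp) (by simp [pvVal]) (by simp)
        simp only [List.length_nil, pvVal, List.foldl_nil] at this
        rw [this]
        have hloop : validate_ip_partial_py_loop (pvConsHead [] (pvSplit cs)) =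
            validate_ip_partial_py_loop (pvSplit cs) := by
          simp [hrec, pvConsHead]
        rw [hloop]
        have hloop2 : validate_ip_partial_py_loop (pvConsHead p (pvSplit ('.' :: cs))) =
            ((decide (p.length ≤ 3) && decide (pvVal p ≤ 255)) &&
              validate_ip_partial_py_loop (pvSplit cs)) := by
          simp only [hsplit, pvConsHead, List.append_nil]
          exact pvLoop_cons p (pvSplit cs) hdig
        rw [hloop2]
        have h3 : (decide (d + 1 + (pvSplit cs).length ≤ 4)) = (decide (d + (pvSplit ('.' :: cs)).length ≤ 4)) := by
          apply decide_eq_decide.mpr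
          rw [hsplit]
          constructor <;> (intro; simp at *; omega)
        rw [h3]
        simp [List.all_cons, hlen, hval]
    · by_cases hdig9 : '0' ≤ c ∧ c ≤ '9'
      · have hcD : c ∈ pvD := pvDigit_mem c hdig9.1 hdig9.2
        have hcOK := pvMem_charOK c hcD
        have hsplit : pvSplit (c :: cs) = (c :: h0) :: t0 := by simp [pvSplit, hc, hrec]
        have hcons : pvConsHead p (pvSplit (c :: cs)) = ((p ++ [c]) ++ h0) :: t0 := by
          simp [hsplit, pvConsHead]
        by_cases hl : p.length + 1 > 3
        · rw [validate_ip_partial_py_scan, if_neg hc, if_pos hdig9, if_pos hl]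
          have : validate_ip_partial_py_loop (pvConsHead p (pvSplit (c :: cs))) = false := by
            rw [hcons]
            exact pvLoop_long _ _ (by simp) (by simp; omega)
          simp [this]
        · by_cases hv : pvVal p * 10 + (c.toNat - 48) > 255
          · rw [validate_ip_partial_py_scan, if_neg hc, if_pos hdig9, if_neg hl, if_pos hv]
            by_cases hall : (cs.all fun c => "0123456789.".toList.contains c) = true
            · have hh0 : ∀ x ∈ h0, x ∈ pvD := pvHead_digits cs h0 t0 hall hrec
              have hfl : validate_ip_partial_py_loop (pvConsHead p (pvSplit (c :: cs))) = false := by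
                rw [hcons]
                by_cases hql : ((p ++ [c]) ++ h0).length ≤ 3
                · rw [pvLoop_cons _ _ (by
                    intro x hx
                    rcases List.mem_append.mp hx with hx | hx
                    · rcases List.mem_append.mp hx with hx | hx
                      · exact hdig x hx
                      · simp at hx; subst hx; exact hcD
                    · exact hh0 x hx)]
                  have hnv : ¬ (pvVal ((p ++ [c]) ++ h0) ≤ 255) := by
                    have := pvVal_le_append (p ++ [c]) h0
                    rw [pvVal_append] at this
                    omega
                  simp only [List.append_assoc, List.singleton_append] at hnv
                  simp [hnv]
                · exact pvLoop_long _ _ (by simp) (by omega)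
              rw [hfl]
              simp
            · have hall' : (cs.all fun c => "0123456789.".toList.contains c) = false := by
                simpa using hall
              rw [List.all_cons, hall']
              simp
          · rw [validate_ip_partial_py_scan, if_neg hc, if_pos hdig9, if_neg hl, if_neg hv]
            have hstep : pvVal p * 10 + (c.toNat - 48) = pvVal (p ++ [c]) := (pvVal_append p c).symm
            have hlstep : p.length + 1 = (p ++ [c]).length := by simp
            rw [hstep, hlstep, ih d (p ++ [c]) hd3 (by simp; omega)
              (by rw [← hstep]; omega)
              (by
                intro x hx
                rcases List.mem_append.mp hx with hx | hx
                · exact hdig x hx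
                · simp at hx; subst hx; exact hcD)]
            rw [hcons]
            have : pvConsHead (p ++ [c]) (pvSplit cs) = ((p ++ [c]) ++ h0) :: t0 := by
              simp [hrec, pvConsHead]
            rw [this]
            rw [List.all_cons, hcOK, hrec, hsplit]
            simp only [List.length_cons, Bool.true_and]
            rfl
      · rw [validate_ip_partial_py_scan, if_neg hc, if_neg hdig9]
        have : ("0123456789.".toList.contains c) = false := by
          by_contra h
          rcases pvCharOK_cases c (by simpa using Bool.of_not_eq_false h) with h' | h'
          · exact hc h'
          · exact hdig9 h'
        rw [List.all_cons, this]
        simp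

theorem pvAny_not (cs : List Char) (f : Char → Bool) :
    (cs.any fun c => !f c) = !(cs.all f) := by
  induction cs with
  | nil => simp
  | cons c cs ih => cases hfc : f c <;> simp [hfc, ih]

-- ===== VERDICT (by name: the statement is the Claim_ definition above) =====
theorem validate_ip_partial_py_spec : Claim_equal_validate_ip_partial_py := by
  intro value _
  unfold Spec_validate_ip_partial_py validate_ip_partial_py validate_ip_partial_py_alt
  by_cases hempty : value = ""
  · simp [hempty]
  · rw [if_neg hempty, if_neg hempty]
    by_cases hlen : PySem.Str.len value > 15
    · rw [if_pos hlen, if_pos hlen]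
    · rw [if_neg hlen, if_neg hlen]
      have hscan := pvScan_spec value.toList 0 [] (by omega) (by simp) (by simp [pvVal]) (by simp)
      simp only [List.length_nil, pvVal, List.foldl_nil] at hscan
      obtain ⟨h0, t0, hrec⟩ := pvSplit_cons_exists value.toList
      have hcons : pvConsHead [] (pvSplit value.toList) = pvSplit value.toList := by
        simp [hrec, pvConsHead]
      rw [hscan, hcons, pvAny_not]
      simp only [pvSplitOn_eq]
      by_cases hall : (value.toList.all fun c => "0123456789.".toList.contains c) = true
      · rw [hall]
        simp only [Bool.not_true, Bool.true_and]
        by_cases h4 : (pvSplit value.toList).length > 4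
        · rw [if_neg (by simp), if_pos (by simpa using h4)]
          rw [decide_eq_false (by omega : ¬ (0 + (pvSplit value.toList).length ≤ 4))]
          simp
        · rw [if_neg (by simp), if_neg (by simpa using h4)]
          rw [decide_eq_true (by omega : (0 + (pvSplit value.toList).length ≤ 4))]
          simp
      · have hall' : (value.toList.all fun c => "0123456789.".toList.contains c) = false := by
          simpa using hall
        rw [hall']
        simp
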